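-- pv_equiv track=rewrite | github.com/shinhanseo/Algorithm | 프로그래머스/1/389478. 택배 상자 꺼내기/택배 상자 꺼내기.py | solution
-- ===== SOURCE A (Python) =====
-- def solution(n, w, num) :
--     box = []
--     box_n = 1
--     line_n = 1
--     state = 0
--     height = n//w if n%w == 0 else n//w + 1
--     cnt = 1
--     for _ in range(height) :
--         line = []
--         for _ in range(w) :
--             if line_n%2 == 1 :
--                 line.append(box_n)
--             else :
--                 line.insert(0,box_n)
--
--             if box_n >= n :
--                 state = 1
--
--             if state :
--                 box_n = 0
--             else :
--                 box_n += 1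
--
--         box.append(line)
--         line_n += 1
--
--     for i in range(len(box)):         # 행 인덱스
--         for j in range(len(box[0])):  # 열 인덱스
--             if box[i][j] == num:
--                 row = i
--                 col = j
--                 break
--
--     for i in range(row+1, len(box)) :
--         if box[i][col] != 0 :
--             cnt += 1
--
--     return cnt
-- ===== SOURCE B (Python) =====
-- def solution(n, w, num):
--     # O(1) arithmetic: locate num's (row, col) in the serpentine grid directly,
--     # then count the filled cells stacked above it in its column by formula.
--     if w < 1 or num < 1 or num > n:
--         raise ValueError("num is not a box number of an n-box grid of width w")
--     h = -(-n // w)                    # number of rows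
--     q, r = divmod(num - 1, w)
--     col = r if q % 2 == 0 else w - 1 - r
--     full = h - 2 - q                  # rows strictly between q and the top row: all filled
--     if full < 0:
--         full = 0
--     last = 0
--     if q < h - 1:                     # is the top row's cell in this column filled?
--         rem = n - (h - 1) * w         # boxes in the top row
--         if (h - 1) % 2 == 0:
--             last = 1 if col < rem else 0
--         else:
--             last = 1 if col >= w - rem else 0
--     return 1 + full + last
-- ===== Notes on version B (the rewrite author's own statement) =====
-- stated objective: faster
-- what changed: B replaces A's O(n) construction of the whole serpentine grid plus two scan loops by O(1) arithmetic: row/col of num by divmod, and the count of filled cells above it in its column by a closed-form last-row test.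
-- outside the precondition, e.g. on solution(5, 3, 0): A returns 1, B raises ValueError
import Mathlib
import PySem

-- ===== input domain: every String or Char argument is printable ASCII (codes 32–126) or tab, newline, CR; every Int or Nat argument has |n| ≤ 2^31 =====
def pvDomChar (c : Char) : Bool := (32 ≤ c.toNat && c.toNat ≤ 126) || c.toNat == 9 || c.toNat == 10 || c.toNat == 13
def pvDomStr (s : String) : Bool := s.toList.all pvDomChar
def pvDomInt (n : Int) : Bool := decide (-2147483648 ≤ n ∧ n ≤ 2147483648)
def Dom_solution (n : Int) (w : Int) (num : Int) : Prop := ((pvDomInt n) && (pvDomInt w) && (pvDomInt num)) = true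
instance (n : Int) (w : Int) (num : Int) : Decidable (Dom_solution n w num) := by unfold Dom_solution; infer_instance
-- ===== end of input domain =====

-- B computes num's (row, col) and the count of filled cells above it by O(1) arithmetic
-- instead of A's O(n) grid construction and scans; equivalence proved on the natural
-- domain 1 ≤ w, 1 ≤ num ≤ n.


-- ===== PORT A =====
-- one inner-loop iteration: append/prepend box_n to line, update state and box_n
def pvBuildCell (n line_n : Int) (t : List Int × Int × Int) (_i : Int) : List Int × Int × Int :=
  let line := if PySem.Int.mod line_n 2 == 1 then t.1 ++ [t.2.1] else t.2.1 :: t.1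
  let state := if t.2.1 ≥ n then (1 : Int) else t.2.2
  let box_n := if state ≠ 0 then (0 : Int) else t.2.1 + 1
  (line, box_n, state)

-- one outer-loop iteration: build a line and append it to box; state is (box, box_n, line_n, state)
def pvBuildRow (n w : Int) (s : List (List Int) × Int × Int × Int) (_i : Int) :
    List (List Int) × Int × Int × Int :=
  let inner := (PySem.List.pyRange 0 w 1).foldl (pvBuildCell n s.2.2.1) ([], s.2.1, s.2.2.2)
  (s.1 ++ [inner.1], inner.2.1, s.2.2.1 + 1, inner.2.2)

-- inner search step with Python's 'break' modelled by a Bool flag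
def pvSearchCell (num : Int) (cells : List Int) (i : Int) (t : Option Int × Option Int × Bool)
    (j : Int) : Option Int × Option Int × Bool :=
  if t.2.2 then t
  else if PySem.List.pyGetD cells j 0 == num then (some i, some j, true)
  else t

-- outer search step: scan row i's cells (up to len(box[0])), keeping the last match's (row, col)
def pvSearchRow (num : Int) (box : List (List Int)) (rc : Option Int × Option Int) (i : Int) :
    Option Int × Option Int :=
  let t := (PySem.List.pyRange 0 (((box.headD []).length : Int)) 1).foldl
    (pvSearchCell num (PySem.List.pyGetD box i []) i) (rc.1, rc.2, false)
  (t.1, t.2.1)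

-- one iteration of the final counting loop
def pvCountStep (box : List (List Int)) (col : Int) (cnt : Int) (i : Int) : Int :=
  if PySem.List.pyGetD (PySem.List.pyGetD box i []) col 0 ≠ 0 then cnt + 1 else cnt

def solution (n : Int) (w : Int) (num : Int) : Int :=
  let height := if PySem.Int.mod n w == 0 then PySem.Int.floordiv n w
                else PySem.Int.floordiv n w + 1
  let s := (PySem.List.pyRange 0 height 1).foldl (pvBuildRow n w) ([], 1, 1, 0)
  let box := s.1
  let rc := (PySem.List.pyRange 0 ((box.length : Int)) 1).foldl (pvSearchRow num box)
    ((none : Option Int), (none : Option Int))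
  -- Python raises NameError when num is not in the grid (row/col unbound): outside Pre_
  let row := rc.1.getD 0
  let col := rc.2.getD 0
  (PySem.List.pyRange (row + 1) ((box.length : Int)) 1).foldl (pvCountStep box col) 1

-- ===== PORT B =====
def solution_alt (n : Int) (w : Int) (num : Int) : Int :=
  -- Python B raises ValueError on this guard: those inputs are outside Pre_solution
  if w < 1 ∨ num < 1 ∨ num > n then 0 else
  let h := -(PySem.Int.floordiv (-n) w)
  let q := PySem.Int.floordiv (num - 1) w
  let r := PySem.Int.mod (num - 1) w
  let col := if PySem.Int.mod q 2 == 0 then r else w - 1 - r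
  let full0 := h - 2 - q
  let full := if full0 < 0 then 0 else full0
  let last :=
    if q < h - 1 then
      let rem := n - (h - 1) * w
      if PySem.Int.mod (h - 1) 2 == 0 then (if col < rem then (1 : Int) else 0)
      else (if col ≥ w - rem then (1 : Int) else 0)
    else 0
  1 + full + last

-- ===== PRECONDITION & SPEC =====
-- Pre_ is the task's natural domain (num is one of the boxes 1..n, grid width positive).
-- Outside it A raises (ZeroDivisionError for w = 0, NameError when num is not in the grid)
-- except for num = 0 with n % w != 0, where A accidentally matches the first padding zero of
-- the top row; B's validation raises ValueError there — see the cite in claim.json.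
def Pre_solution (n : Int) (w : Int) (num : Int) : Prop := 1 ≤ w ∧ 1 ≤ num ∧ num ≤ n
instance (n : Int) (w : Int) (num : Int) : Decidable (Pre_solution n w num) := by
  unfold Pre_solution; infer_instance

def pvWitness_solution : Int × Int × Int := (5, 3, 4)

def Spec_solution (n : Int) (w : Int) (num : Int) (out : Int) : Prop := out = solution_alt n w num
instance (n : Int) (w : Int) (num : Int) (out : Int) : Decidable (Spec_solution n w num out) := by
  unfold Spec_solution; infer_instance

-- ===== CLAIM (what is proved, stated in full; the proofs are below) =====
def Claim_equal_solution : Prop := ∀ (n : Int) (w : Int) (num : Int), Dom_solution n w num →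
  Pre_solution n w num → Spec_solution n w num (solution n w num)

-- ===== LEMMAS AND PROOFS =====

-- value of the k-th (0-based) cell in creation order: 1..n then padding zeros
def cellv (n k : Int) : Int := if k < n then k + 1 else 0
-- the 'state' flag before creating cell k
def stv (n k : Int) : Int := if n <= k then 1 else 0
-- the m consecutive cell values starting at cell k
def cellsv (n k : Int) (m : Nat) : List Int :=
  (List.range m).map (fun (j : Nat) => cellv n (k + (j : Int)))
-- row i of the finished grid (serpentine: odd rows reversed)
def rowv (n w : Int) (i : Nat) : List Int :=
  if i % 2 = 0 then cellsv n ((i : Int) * w) w.toNat else (cellsv n ((i : Int) * w) w.toNat).reverse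

lemma cellsv_succ (n k : Int) (m : Nat) :
    cellsv n k (m + 1) = cellv n k :: cellsv n (k + 1) m := by
  simp only [cellsv, List.range_succ_eq_map, List.map_cons, List.map_map, Nat.cast_zero, add_zero]
  refine congrArg₂ _ rfl ?_
  apply List.map_congr_left; intro j _
  simp only [Function.comp]; congr 1; push_cast; ring

lemma buildCell_step (n line_n k : Int) (hn : 1 ≤ n) (_hk : 0 ≤ k) (line : List Int) (i : Int) :
    pvBuildCell n line_n (line, cellv n k, stv n k) i =
      ((if PySem.Int.mod line_n 2 == 1 then line ++ [cellv n k] else cellv n k :: line),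
        cellv n (k + 1), stv n (k + 1)) := by
  simp only [pvBuildCell, cellv, stv]
  split_ifs <;> simp_all <;> omega

lemma build_inner_app (n line_n : Int) (hn : 1 ≤ n)
    (hpar : (PySem.Int.mod line_n 2 == 1) = true) :
    ∀ (l : List Int) (k : Int), 0 ≤ k → ∀ (line : List Int),
      l.foldl (pvBuildCell n line_n) (line, cellv n k, stv n k) =
        (line ++ cellsv n k l.length, cellv n (k + l.length), stv n (k + l.length)) := by
  intro l
  induction l with
  | nil => intro k _ line; simp [cellsv]
  | cons x xs ih =>
    intro k hk line
    rw [List.foldl_cons, buildCell_step n line_n k hn hk line x, if_pos hpar,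
      ih (k + 1) (by omega) (line ++ [cellv n k])]
    simp only [List.length_cons, cellsv_succ, Prod.mk.injEq]
    refine ⟨by simp, by congr 1; push_cast; ring, by congr 1; push_cast; ring⟩

lemma build_inner_pre (n line_n : Int) (hn : 1 ≤ n)
    (hpar : (PySem.Int.mod line_n 2 == 1) = false) :
    ∀ (l : List Int) (k : Int), 0 ≤ k → ∀ (line : List Int),
      l.foldl (pvBuildCell n line_n) (line, cellv n k, stv n k) =
        ((cellsv n k l.length).reverse ++ line, cellv n (k + l.length), stv n (k + l.length)) := by
  intro l
  induction l with
  | nil => intro k _ line; simp [cellsv]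
  | cons x xs ih =>
    intro k hk line
    have hne : ¬ ((PySem.Int.mod line_n 2 == 1) = true) := by rw [hpar]; simp
    rw [List.foldl_cons, buildCell_step n line_n k hn hk line x, if_neg hne,
      ih (k + 1) (by omega) (cellv n k :: line)]
    simp only [List.length_cons, cellsv_succ, Prod.mk.injEq, List.reverse_cons, List.append_assoc]
    refine ⟨by simp, by congr 1; push_cast; ring, by congr 1; push_cast; ring⟩

lemma mod_one_add_two (t : Nat) :
    (PySem.Int.mod (1 + (t : Int)) 2 == 1) = (t % 2 == 0) := by
  rw [PySem.Int.mod_eq_emod_of_pos (by omega), Bool.eq_iff_iff]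
  simp only [beq_iff_eq]
  omega

lemma build_rows (n w : Int) (hn : 1 ≤ n) (hw : 1 ≤ w) : ∀ t : Nat,
    (PySem.List.pyRange 0 (t : Int) 1).foldl (pvBuildRow n w) ([], 1, 1, 0) =
      ((List.range t).map (rowv n w), cellv n ((t : Int) * w), 1 + (t : Int), stv n ((t : Int) * w)) := by
  intro t
  induction t with
  | zero => simp [PySem.List.pyRange_one_eq_nil, cellv, stv]; omega
  | succ t ih =>
    have hsplit : PySem.List.pyRange 0 ((t + 1 : Nat) : Int) 1 =
        PySem.List.pyRange 0 (t : Int) 1 ++ [(t : Int)] := by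
      push_cast
      exact PySem.List.pyRange_one_succ_right (by omega)
    rw [hsplit, List.foldl_append, ih]
    simp only [List.foldl_cons, List.foldl_nil, pvBuildRow]
    have hlen : (PySem.List.pyRange 0 w 1).length = w.toNat := by
      rw [PySem.List.length_pyRange_one]; congr 1; omega
    have hk0 : (0 : Int) ≤ (t : Int) * w := mul_nonneg (by positivity) (by omega)
    have hcw : ((w.toNat : Int)) = w := by omega
    by_cases hp : t % 2 = 0
    · have hpar : (PySem.Int.mod (1 + (t : Int)) 2 == 1) = true := by
        rw [mod_one_add_two]; simp [hp]
      have hinner := build_inner_app n (1 + (t : Int)) hn hpar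
        (PySem.List.pyRange 0 w 1) ((t : Int) * w) hk0 []
      rw [hlen] at hinner
      rw [hinner]
      simp only [Prod.mk.injEq, List.nil_append]
      refine ⟨?_, by rw [hcw]; congr 1; push_cast; ring, by push_cast; ring,
        by rw [hcw]; congr 1; push_cast; ring⟩
      rw [List.range_succ, List.map_append]
      simp [rowv, hp]
    · have hpar : (PySem.Int.mod (1 + (t : Int)) 2 == 1) = false := by
        rw [mod_one_add_two]; simp [hp]
      have hinner := build_inner_pre n (1 + (t : Int)) hn hpar
        (PySem.List.pyRange 0 w 1) ((t : Int) * w) hk0 []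
      rw [hlen] at hinner
      rw [hinner]
      simp only [Prod.mk.injEq, List.append_nil]
      refine ⟨?_, by rw [hcw]; congr 1; push_cast; ring, by push_cast; ring,
        by rw [hcw]; congr 1; push_cast; ring⟩
      rw [List.range_succ, List.map_append]
      simp [rowv, hp]

lemma length_cellsv (n k : Int) (m : Nat) : (cellsv n k m).length = m := by
  simp [cellsv]

lemma length_rowv (n w : Int) (i : Nat) : (rowv n w i).length = w.toNat := by
  unfold rowv; split_ifs <;> simp [length_cellsv]

lemma cellsv_get (n k : Int) (m j : Nat) (hj : j < m) :
    (cellsv n k m)[j]'(by simp [length_cellsv, hj]) = cellv n (k + (j : Int)) := by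
  simp [cellsv]

lemma rowv_get (n w : Int) (hw : 1 ≤ w) (i j : Nat) (hj : j < w.toNat) :
    PySem.List.pyGetD (rowv n w i) ((j : Nat) : Int) 0 =
      cellv n ((i : Int) * w + (if i % 2 = 0 then (j : Int) else w - 1 - (j : Int))) := by
  rw [PySem.List.pyGetD_natCast]
  rw [List.getD_eq_getElem?_getD, List.getElem?_eq_getElem (by rw [length_rowv]; exact hj)]
  unfold rowv
  by_cases hp : i % 2 = 0
  · simp only [hp, if_true]
    rw [cellsv_get n _ _ j hj]
    simp only [Option.getD_some]
  · simp only [hp, if_false]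
    rw [List.getElem_reverse]
    simp only [length_cellsv]
    rw [cellsv_get n _ _ _ (by omega)]
    simp only [Option.getD_some]
    congr 1
    omega

lemma cellv_eq_num (n num k : Int) (h1 : 1 ≤ num) (h2 : num ≤ n) :
    cellv n k = num ↔ k = num - 1 := by
  unfold cellv
  split_ifs <;> omega

-- once the break flag is set, the inner search loop is inert
lemma searchCell_true (num : Int) (cells : List Int) (i : Int) (l : List Int)
    (r c : Option Int) : l.foldl (pvSearchCell num cells i) (r, c, true) = (r, c, true) := by
  induction l with
  | nil => rfl
  | cons x xs ih => simp [pvSearchCell, ih]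

-- a row stretch with no match leaves the inner state unchanged
lemma searchCell_none (num : Int) (cells : List Int) (i : Int) (l : List Int)
    (h : ∀ j ∈ l, ¬ (PySem.List.pyGetD cells j 0 = num)) (r c : Option Int) :
    l.foldl (pvSearchCell num cells i) (r, c, false) = (r, c, false) := by
  induction l with
  | nil => rfl
  | cons x xs ih =>
    rw [List.foldl_cons]
    have hx : ¬ (PySem.List.pyGetD cells x 0 == num) = true := by
      simp only [beq_iff_eq]; exact h x (List.mem_cons_self)
    have hstep : pvSearchCell num cells i (r, c, false) x = (r, c, false) := by
      simp [pvSearchCell, hx]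
    rw [hstep]
    exact ih (fun j hj => h j (List.mem_cons_of_mem _ hj))

-- a row whose unique match sits at j0 sets (row, col) = (i, j0)
lemma searchRow_hit (num : Int) (cells : List Int) (i L j0 : Int)
    (hj0 : 0 ≤ j0) (hlt : j0 < L)
    (hhit : PySem.List.pyGetD cells j0 0 = num)
    (hbef : ∀ j, 0 ≤ j → j < j0 → ¬ (PySem.List.pyGetD cells j 0 = num)) (r c : Option Int) :
    (PySem.List.pyRange 0 L 1).foldl (pvSearchCell num cells i) (r, c, false) =
      (some i, some j0, true) := by
  rw [PySem.List.pyRange_one_append 0 j0 L hj0 (le_of_lt hlt), List.foldl_append,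
    searchCell_none num cells i _ (by
      intro j hj
      rw [PySem.List.mem_pyRange_one] at hj
      exact hbef j hj.1 hj.2),
    PySem.List.pyRange_one_cons hlt, List.foldl_cons]
  have hstep : pvSearchCell num cells i (r, c, false) j0 = (some i, some j0, true) := by
    simp [pvSearchCell, hhit]
  rw [hstep]
  exact searchCell_true num cells i _ _ _

-- rows with no match leave the outer state unchanged
lemma searchRows_none (num : Int) (box : List (List Int)) (l : List Int)
    (h : ∀ i ∈ l, ∀ j, 0 ≤ j → j < ((box.headD []).length : Int) →
      ¬ (PySem.List.pyGetD (PySem.List.pyGetD box i []) j 0 = num)) (rc : Option Int × Option Int) :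
    l.foldl (pvSearchRow num box) rc = rc := by
  induction l generalizing rc with
  | nil => rfl
  | cons x xs ih =>
    rw [List.foldl_cons]
    have hx : pvSearchRow num box rc x = rc := by
      unfold pvSearchRow
      rw [searchCell_none num _ x _ (by
        intro j hj
        rw [PySem.List.mem_pyRange_one] at hj
        exact h x List.mem_cons_self j hj.1 hj.2)]
    rw [hx]
    exact ih (fun i hi => h i (List.mem_cons_of_mem _ hi)) rc

-- counting over a stretch where every cell is non-zero adds its length
lemma count_all (box : List (List Int)) (C : Int) : ∀ (l : List Int) (init : Int),
    (∀ i ∈ l, PySem.List.pyGetD (PySem.List.pyGetD box i []) C 0 ≠ 0) →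
    l.foldl (pvCountStep box C) init = init + l.length := by
  intro l
  induction l with
  | nil => intro init _; simp
  | cons x xs ih =>
    intro init h
    rw [List.foldl_cons, pvCountStep, if_pos (h x List.mem_cons_self),
      ih (init + 1) (fun i hi => h i (List.mem_cons_of_mem _ hi))]
    simp only [List.length_cons]
    push_cast
    ring

lemma parity_toNat (x : Int) (hx : 0 ≤ x) : PySem.Int.mod x 2 = 0 ↔ x.toNat % 2 = 0 := by
  rw [PySem.Int.mod_eq_emod_of_pos (by omega)]
  omega

lemma cellv_ne_zero (n k : Int) (hk : 0 ≤ k) : cellv n k ≠ 0 ↔ k < n := by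
  unfold cellv; split_ifs <;> omega

lemma div_unique (w a b r1 r2 : Int) (hw : 1 ≤ w) (hr1 : 0 ≤ r1) (h1 : r1 < w)
    (hr2 : 0 ≤ r2) (h2 : r2 < w) (heq : a * w + r1 = b * w + r2) : a = b ∧ r1 = r2 := by
  have hab : a = b := by
    by_contra hne
    rcases lt_or_gt_of_ne hne with hlt | hgt
    · nlinarith [mul_le_mul_of_nonneg_right (show (1:Int) ≤ b - a by omega)
        (show (0:Int) ≤ w by omega)]
    · nlinarith [mul_le_mul_of_nonneg_right (show (1:Int) ≤ a - b by omega)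
        (show (0:Int) ≤ w by omega)]
  refine ⟨hab, ?_⟩
  rw [hab] at heq
  linarith

lemma quot_nonneg (w q r : Int) (hw : 1 ≤ w) (hr : r < w) (h : 0 ≤ q * w + r) : 0 ≤ q := by
  by_contra h'
  nlinarith [mul_le_mul_of_nonneg_right (show q ≤ -1 by omega) (show (0:Int) ≤ w by omega)]

lemma quot_lt (w q r H : Int) (hw : 1 ≤ w) (hr : 0 ≤ r) (h : q * w + r < H * w) : q < H := by
  by_contra h'
  nlinarith [mul_le_mul_of_nonneg_right (show H ≤ q by omega) (show (0:Int) ≤ w by omega)]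

lemma row_full (n w H i off : Int) (hw : 1 ≤ w) (hbr1 : (H - 1) * w < n)
    (hi : i ≤ H - 2) (hoff : off ≤ w - 1) : i * w + off < n := by
  nlinarith [mul_le_mul_of_nonneg_right hi (show (0:Int) ≤ w by omega)]

theorem solution_spec : Claim_equal_solution := by
  intro n w num _hdom hpre
  obtain ⟨hw, h1, h2⟩ := hpre
  have hn : 1 ≤ n := le_trans h1 h2
  unfold Spec_solution
  -- name the common arithmetic quantities
  obtain ⟨H, hHeq⟩ : ∃ x, (if PySem.Int.mod n w == 0 then PySem.Int.floordiv n w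
      else PySem.Int.floordiv n w + 1) = x := ⟨_, rfl⟩
  obtain ⟨Q, hQeq⟩ : ∃ x, PySem.Int.floordiv (num - 1) w = x := ⟨_, rfl⟩
  obtain ⟨R, hReq⟩ : ∃ x, PySem.Int.mod (num - 1) w = x := ⟨_, rfl⟩
  have hbr : (H - 1) * w < n ∧ n ≤ H * w := by
    have hdm := PySem.Int.floordiv_mul_add_mod n w
    have hm0 := PySem.Int.mod_nonneg n (show (0:Int) < w by omega)
    have hmw := PySem.Int.mod_lt n (show (0:Int) < w by omega)
    by_cases h0 : PySem.Int.mod n w = 0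
    · rw [if_pos (by simp [h0])] at hHeq
      rw [h0] at hdm
      constructor <;> nlinarith [hdm, hHeq]
    · rw [if_neg (by simp [h0])] at hHeq
      have hm1 : 1 ≤ PySem.Int.mod n w := by omega
      constructor <;> nlinarith [hdm, hHeq, hm1, hmw]
  have hHB : -(PySem.Int.floordiv (-n) w) = H :=
    (PySem.Int.neg_floordiv_neg_eq_iff_of_pos (by omega)).mpr hbr
  have hH1 : 1 ≤ H := by
    by_contra h'
    nlinarith [hbr.2, mul_le_mul_of_nonneg_right (show H ≤ 0 by omega)
      (show (0:Int) ≤ w by omega)]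
  have hQR : Q * w + R = num - 1 := by
    rw [← hQeq, ← hReq]; exact PySem.Int.floordiv_mul_add_mod (num - 1) w
  have hR0 : 0 ≤ R := hReq ▸ PySem.Int.mod_nonneg (num - 1) (by omega)
  have hRw : R < w := hReq ▸ PySem.Int.mod_lt (num - 1) (by omega)
  have hQ0 : 0 ≤ Q := quot_nonneg w Q R hw hRw (by rw [hQR]; omega)
  have hQH : Q < H := quot_lt w Q R H hw hR0 (by linarith [hQR, hbr.2, h2])
  obtain ⟨C, hCeq⟩ : ∃ x, (if PySem.Int.mod Q 2 == 0 then R else w - 1 - R) = x := ⟨_, rfl⟩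
  have hCb : 0 ≤ C ∧ C < w := by rw [← hCeq]; split_ifs <;> omega
  -- the grid
  have hHcast : ((H.toNat : Nat) : Int) = H := by omega
  have hbuild := build_rows n w hn hw H.toNat
  have hboxlen : ((List.range H.toNat).map (rowv n w)).length = H.toNat := by simp
  have hhead : ((List.range H.toNat).map (rowv n w)).headD [] = rowv n w 0 := by
    obtain ⟨k, hk⟩ : ∃ k, H.toNat = k + 1 := ⟨H.toNat - 1, by omega⟩
    rw [hk, List.range_succ_eq_map]
    simp
  have hheadlen : ((((List.range H.toNat).map (rowv n w)).headD []).length : Int) = w := by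
    rw [hhead, length_rowv]; omega
  -- cell characterization
  have hcell : ∀ i : Int, 0 ≤ i → i < H → ∀ j : Int, 0 ≤ j → j < w →
      PySem.List.pyGetD (PySem.List.pyGetD ((List.range H.toNat).map (rowv n w)) i []) j 0 =
        cellv n (i * w + (if i.toNat % 2 = 0 then j else w - 1 - j)) := by
    intro i hi0 hiH j hj0 hjw
    have hrow : PySem.List.pyGetD ((List.range H.toNat).map (rowv n w)) i [] = rowv n w i.toNat := by
      rw [show i = ((i.toNat : Nat) : Int) by omega, PySem.List.pyGetD_natCast,
        List.getD_eq_getElem?_getD, List.getElem?_map, List.getElem?_range (by omega)]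
      simp
      congr 1
      omega
    rw [hrow, show j = ((j.toNat : Nat) : Int) by omega,
      rowv_get n w hw i.toNat j.toNat (by omega)]
    rw [Int.toNat_of_nonneg hi0, Int.toNat_of_nonneg hj0]
  -- match characterization
  have hmatch : ∀ i : Int, 0 ≤ i → i < H → ∀ j : Int, 0 ≤ j → j < w →
      (PySem.List.pyGetD (PySem.List.pyGetD ((List.range H.toNat).map (rowv n w)) i []) j 0 = num
        ↔ (i = Q ∧ j = C)) := by
    intro i hi0 hiH j hj0 hjw
    rw [hcell i hi0 hiH j hj0 hjw, cellv_eq_num n num _ h1 h2]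
    have hoffb : 0 ≤ (if i.toNat % 2 = 0 then j else w - 1 - j) ∧
        (if i.toNat % 2 = 0 then j else w - 1 - j) < w := by split_ifs <;> omega
    constructor
    · intro heq
      have hx : i * w + (if i.toNat % 2 = 0 then j else w - 1 - j) = Q * w + R := by
        rw [heq, hQR]
      obtain ⟨hiQ, hoffR⟩ := div_unique w i Q _ R hw hoffb.1 hoffb.2 hR0 hRw hx
      refine ⟨hiQ, ?_⟩
      have hparc : i.toNat % 2 = 0 ↔ PySem.Int.mod Q 2 = 0 := by
        rw [hiQ]; exact (parity_toNat Q hQ0).symm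
      by_cases hq2 : PySem.Int.mod Q 2 = 0
      · rw [if_pos (hparc.mpr hq2)] at hoffR
        rw [if_pos (by simp only [beq_iff_eq]; exact hq2)] at hCeq
        omega
      · rw [if_neg (fun hcc => hq2 (hparc.mp hcc))] at hoffR
        rw [if_neg (by simp only [beq_iff_eq]; exact hq2)] at hCeq
        omega
    · rintro ⟨rfl, rfl⟩
      have hparc : i.toNat % 2 = 0 ↔ PySem.Int.mod i 2 = 0 := (parity_toNat i hi0).symm
      by_cases hq2 : PySem.Int.mod i 2 = 0
      · rw [if_pos (hparc.mpr hq2)]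
        rw [if_pos (by simp only [beq_iff_eq]; exact hq2)] at hCeq
        omega
      · rw [if_neg (fun hcc => hq2 (hparc.mp hcc))]
        rw [if_neg (by simp only [beq_iff_eq]; exact hq2)] at hCeq
        omega
  -- the search loops locate (Q, C)
  have hnomatch : ∀ (l : List Int), (∀ i ∈ l, 0 ≤ i ∧ i < H ∧ i ≠ Q) →
      ∀ rc, l.foldl (pvSearchRow num ((List.range H.toNat).map (rowv n w))) rc = rc := by
    intro l hl rc
    refine searchRows_none num _ l ?_ rc
    intro i hi j hj0 hjlt
    rw [hheadlen] at hjlt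
    obtain ⟨hi0, hiH, hiQ⟩ := hl i hi
    intro hcon
    exact hiQ ((hmatch i hi0 hiH j hj0 hjlt).mp hcon).1
  have hsearch : (PySem.List.pyRange 0 (((List.range H.toNat).map (rowv n w)).length : Int) 1).foldl
      (pvSearchRow num ((List.range H.toNat).map (rowv n w)))
      ((none : Option Int), (none : Option Int)) = (some Q, some C) := by
    rw [show ((((List.range H.toNat).map (rowv n w)).length : Nat) : Int) = H by
        rw [hboxlen]; omega]
    rw [PySem.List.pyRange_one_append 0 Q H hQ0 (le_of_lt hQH), List.foldl_append,
      hnomatch (PySem.List.pyRange 0 Q 1)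
        (by intro i hi; rw [PySem.List.mem_pyRange_one] at hi; exact ⟨hi.1, by omega, by omega⟩)
        ((none : Option Int), (none : Option Int)),
      PySem.List.pyRange_one_cons hQH, List.foldl_cons]
    have hrowQ : pvSearchRow num ((List.range H.toNat).map (rowv n w)) (none, none) Q =
        (some Q, some C) := by
      unfold pvSearchRow
      rw [hheadlen, searchRow_hit num _ Q w C hCb.1 hCb.2
        ((hmatch Q hQ0 hQH C hCb.1 hCb.2).mpr ⟨rfl, rfl⟩)
        (fun j hj0 hjC hcon => by
          have := ((hmatch Q hQ0 hQH j hj0 (by omega)).mp hcon).2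
          omega) none none]
    rw [hrowQ]
    exact hnomatch (PySem.List.pyRange (Q + 1) H 1) (by
      intro i hi
      rw [PySem.List.mem_pyRange_one] at hi
      exact ⟨by omega, hi.2, by omega⟩) (some Q, some C)
  -- evaluate port A
  have hA : solution n w num =
      1 + (if H - 2 - Q < 0 then 0 else H - 2 - Q) +
        (if Q < H - 1 then
          (if PySem.Int.mod (H - 1) 2 == 0 then (if C < n - (H - 1) * w then (1:Int) else 0)
            else (if C ≥ w - (n - (H - 1) * w) then (1:Int) else 0))
          else 0) := by
    rw [solution.eq_1, hHeq, show H = ((H.toNat : Nat) : Int) by omega, hbuild]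
    dsimp only
    rw [hHcast, hsearch]
    dsimp only [Option.getD_some]
    rw [show ((((List.range H.toNat).map (rowv n w)).length : Nat) : Int) = H by
        rw [hboxlen]; omega]
    -- non-zero test on a cell strictly above row Q in column C
    have hcellC : ∀ i : Int, Q < i → i < H →
        (PySem.List.pyGetD (PySem.List.pyGetD ((List.range H.toNat).map (rowv n w)) i []) C 0 ≠ 0
          ↔ i * w + (if i.toNat % 2 = 0 then C else w - 1 - C) < n) := by
      intro i hiQ hiH
      rw [hcell i (by omega) hiH C hCb.1 hCb.2]
      have hoff0 : 0 ≤ (if i.toNat % 2 = 0 then C else w - 1 - C) := by split_ifs <;> omega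
      have hiw : 0 ≤ i * w := mul_nonneg (by omega) (by omega)
      exact cellv_ne_zero n _ (by omega)
    by_cases hlast : Q < H - 1
    · -- rows Q+1 .. H-2 are full, the top row H-1 is tested
      rw [PySem.List.pyRange_one_append (Q + 1) (H - 1) H (by omega) (by omega),
        List.foldl_append, count_all (List.map (rowv n w) (List.range H.toNat)) C
          (PySem.List.pyRange (Q + 1) (H - 1) 1) 1 (by
          intro i hi
          rw [PySem.List.mem_pyRange_one] at hi
          rw [hcellC i (by omega) (by omega)]
          exact row_full n w H i _ hw hbr.1 (by omega)
            (by split_ifs <;> omega))]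
      have hsingle : PySem.List.pyRange (H - 1) H 1 = [H - 1] := by
        have hps := PySem.List.pyRange_one_singleton (H - 1)
        rwa [show H - 1 + 1 = H by ring] at hps
      rw [hsingle, List.foldl_cons, List.foldl_nil, PySem.List.length_pyRange_one, if_pos hlast]
      rw [pvCountStep]
      have hmid : ((((H - 1) - (Q + 1)).toNat : Nat) : Int) = H - 2 - Q := by omega
      by_cases htop : PySem.List.pyGetD (PySem.List.pyGetD ((List.range H.toNat).map (rowv n w))
          (H - 1) []) C 0 ≠ 0
      · rw [if_pos htop]
        rw [hcellC (H - 1) (by omega) (by omega)] at htop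
        have hpar := parity_toNat (H - 1) (by omega)
        rw [if_neg (show ¬ (H - 2 - Q < 0) by omega), hmid]
        by_cases hq2 : PySem.Int.mod (H - 1) 2 = 0
        · rw [if_pos (by simp only [beq_iff_eq]; exact hq2)]
          rw [if_pos (hpar.mp hq2)] at htop
          rw [if_pos (by omega)]
        · rw [if_neg (by simp only [beq_iff_eq]; exact hq2)]
          rw [if_neg (fun hcc => hq2 (hpar.mpr hcc))] at htop
          rw [if_pos (by omega)]
      · rw [if_neg htop]
        rw [hcellC (H - 1) (by omega) (by omega)] at htop
        have hpar := parity_toNat (H - 1) (by omega)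
        rw [if_neg (show ¬ (H - 2 - Q < 0) by omega), hmid]
        by_cases hq2 : PySem.Int.mod (H - 1) 2 = 0
        · rw [if_pos (by simp only [beq_iff_eq]; exact hq2)]
          rw [if_pos (hpar.mp hq2)] at htop
          rw [if_neg (by omega)]
          ring
        · rw [if_neg (by simp only [beq_iff_eq]; exact hq2)]
          rw [if_neg (fun hcc => hq2 (hpar.mpr hcc))] at htop
          rw [if_neg (by omega)]
          ring
    · -- num sits in the top row: nothing above it
      rw [PySem.List.pyRange_one_eq_nil (by omega), List.foldl_nil,
        if_neg hlast, if_pos (by omega)]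
      ring
  -- evaluate port B
  have hB : solution_alt n w num =
      1 + (if H - 2 - Q < 0 then 0 else H - 2 - Q) +
        (if Q < H - 1 then
          (if PySem.Int.mod (H - 1) 2 == 0 then (if C < n - (H - 1) * w then (1:Int) else 0)
            else (if C ≥ w - (n - (H - 1) * w) then (1:Int) else 0))
          else 0) := by
    rw [solution_alt.eq_1, if_neg (by omega)]
    dsimp only
    rw [hHB, hQeq, hReq, hCeq]
  rw [hA, hB]
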